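-- pv_equiv track=rewrite | github.com/takhyun12/Algorithm-Essential-Training | Solutions/si.py | solution
-- ===== SOURCE A (Python) =====
-- import math
-- from collections import Counter
--
-- def solution(arr1: list, arr2: list) -> list:
--     stack = list()
--     for progress, speed in zip(arr1, arr2):
--         time_required = math.ceil((100 - progress)/ speed)
--         if len(stack) == 0:
--             stack.append(time_required)
--         elif stack[-1] > time_required:
--             stack.append(stack[-1])
--         else:
--             stack.append(time_required)
--
--     answer_list = list(Counter(stack).values())
--     return answer_list
-- ===== SOURCE B (Python) =====
-- import math
--
-- def solution(arr1: list, arr2: list) -> list: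
--     answer = []
--     current = None
--     count = 0
--     for progress, speed in zip(arr1, arr2):
--         d = math.ceil((100 - progress) / speed)
--         if current is None or d > current:
--             if count:
--                 answer.append(count)
--             current = d
--             count = 1
--         else:
--             count += 1
--     if count:
--         answer.append(count)
--     return answer
-- ===== Notes on version B (the rewrite author's own statement) =====
-- stated objective: simpler
-- what changed: B replaces A's running-max stack plus Counter with a single pass over zip(arr1, arr2) that keeps only the current group's deployment day and a running group size, appending each finished group's size directly (no intermediate stack list and no Counter pass, hence the constant-factor speedup).
-- outside the precondition, e.g. on solution([50], [0]): A raises ZeroDivisionError, B raises ZeroDivisionError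
import Mathlib
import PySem

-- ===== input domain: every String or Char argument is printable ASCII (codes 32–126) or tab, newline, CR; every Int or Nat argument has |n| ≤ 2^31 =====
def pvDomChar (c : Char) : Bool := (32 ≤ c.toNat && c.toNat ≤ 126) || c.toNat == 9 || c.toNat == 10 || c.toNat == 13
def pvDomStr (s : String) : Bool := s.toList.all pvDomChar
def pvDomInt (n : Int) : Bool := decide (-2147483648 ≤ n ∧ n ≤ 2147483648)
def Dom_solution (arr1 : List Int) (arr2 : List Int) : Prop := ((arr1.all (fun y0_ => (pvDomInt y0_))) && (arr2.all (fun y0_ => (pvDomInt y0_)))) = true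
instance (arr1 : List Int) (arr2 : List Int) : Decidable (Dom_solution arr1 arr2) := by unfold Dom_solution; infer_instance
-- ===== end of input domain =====

-- B replaces the running-max stack + Counter with a single pass keeping only the current
-- group's day and size (objective: simpler; return values proved equal whenever A returns).

-- math.ceil((100 - p)/s): exact integer ceiling -((-(100-p)) // s); on Dom the float
-- division's ceil equals the exact ceiling (numerator < 2^33 ≪ 2^53), so this is exact.
def pyCeilTime (p s : Int) : Int := -(PySem.Int.floordiv (-(100 - p)) s)

-- ===== PORT A =====
def solutionStep (stack : List Int) (pr : Int × Int) : List Int :=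
  let t := pyCeilTime pr.1 pr.2
  if stack.length == 0 then stack ++ [t]
  else
    -- stack[-1]; guarded: stack is nonempty in this branch, so pyGet? is some
    let last := (PySem.List.pyGet? stack (-1)).getD 0
    if last > t then stack ++ [last] else stack ++ [t]

def solution (arr1 : List Int) (arr2 : List Int) : List Int :=
  let stack := (arr1.zip arr2).foldl solutionStep []
  (PySem.Dict.counter stack).values

-- ===== PORT B =====
def solutionAltStep (s : List Int × Option Int × Int) (pr : Int × Int) :
    List Int × Option Int × Int :=
  let d := pyCeilTime pr.1 pr.2
  match s with
  | (ans, cur, cnt) =>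
    if (match cur with | none => true | some c => decide (c < d)) then
      ((if cnt ≠ 0 then ans ++ [cnt] else ans), some d, 1)
    else
      (ans, cur, cnt + 1)

def solution_alt (arr1 : List Int) (arr2 : List Int) : List Int :=
  let fin := (arr1.zip arr2).foldl solutionAltStep ([], none, 0)
  if fin.2.2 ≠ 0 then fin.1 ++ [fin.2.2] else fin.1

-- ===== PRECONDITION & SPEC =====
-- Pre_ excludes exactly the inputs where a used speed is 0: there A (and B) raise ZeroDivisionError.
def Pre_solution (arr1 : List Int) (arr2 : List Int) : Prop :=
  (0 : Int) ∉ arr2.take arr1.length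
instance (arr1 : List Int) (arr2 : List Int) : Decidable (Pre_solution arr1 arr2) := by
  unfold Pre_solution; infer_instance
def pvWitness_solution : List Int × List Int := ([93, 30, 55], [1, 30, 5])

def Spec_solution (arr1 : List Int) (arr2 : List Int) (out : List Int) : Prop := out = solution_alt arr1 arr2
instance (arr1 : List Int) (arr2 : List Int) (out : List Int) : Decidable (Spec_solution arr1 arr2 out) := by unfold Spec_solution; infer_instance

-- ===== CLAIM (what is proved, stated in full; the proofs are below) =====
def Claim_equal_solution : Prop := ∀ (arr1 : List Int) (arr2 : List Int), Dom_solution arr1 arr2 → Pre_solution arr1 arr2 → Spec_solution arr1 arr2 (solution arr1 arr2)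

-- ===== LEMMAS AND PROOFS =====

-- Counter(l).values as a map over the deduplicated list
def cv (l : List Int) : List Int :=
  (PySem.Set.ofList l).map (fun k => (l.count k : Int))

lemma values_counter_eq_cv (l : List Int) :
    (PySem.Dict.counter l).values = cv l := by
  simp [PySem.Dict.values, PySem.Dict.items_counter, cv, List.map_map, Function.comp]

lemma ofList_replicate (n : Nat) (M : Int) (hn : 1 ≤ n) :
    PySem.Set.ofList (List.replicate n M) = [M] := by
  induction n with
  | zero => omega
  | succ k ih =>
    rcases Nat.eq_zero_or_pos k with hk | hk
    · subst hk; rfl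
    · have h : List.replicate (k + 1) M = [M] ++ List.replicate k M := by
        simp [List.replicate_succ]
      rw [h, PySem.Set.ofList_append, PySem.Set.update_eq_append_filter, ih hk,
        show PySem.Set.ofList [M] = [M] from rfl]
      simp [PySem.Set.contains]

lemma cv_append_run (base : List Int) (M : Int) (n : Nat)
    (hn : 1 ≤ n) (hlt : ∀ x ∈ base, x < M) :
    cv (base ++ List.replicate n M) = cv base ++ [(n : Int)] := by
  have hMnb : M ∉ base := fun h => lt_irrefl M (hlt M h)
  have hset : PySem.Set.ofList (base ++ List.replicate n M)
      = PySem.Set.ofList base ++ [M] := by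
    rw [PySem.Set.ofList_append, PySem.Set.update_eq_append_filter,
      ofList_replicate n M hn]
    simp [PySem.Set.contains, PySem.Set.mem_ofList, hMnb]
  unfold cv
  rw [hset, List.map_append]
  congr 1
  · apply List.map_congr_left
    intro k hk
    have hkb : k ∈ base := (PySem.Set.mem_ofList _ _).mp hk
    have hne : (M == k) = false := by
      simp [show M ≠ k from fun h => absurd (h ▸ hlt k hkb) (lt_irrefl M)]
    simp [List.count_append, List.count_replicate, hne]
  · have h0 : base.count M = 0 := List.count_eq_zero.mpr hMnb
    simp [List.count_append, List.count_replicate, h0]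

-- Main invariant: A's stack is base ++ replicate cnt M with every element of base < M,
-- and B's state is (cv base, some M, cnt).
lemma main_inv (ts : List (Int × Int)) :
    ∀ (base : List Int) (M cnt : Int), 1 ≤ cnt → (∀ x ∈ base, x < M) →
    cv (ts.foldl solutionStep (base ++ List.replicate cnt.toNat M)) =
      (let fin := ts.foldl solutionAltStep (cv base, some M, cnt);
       if fin.2.2 ≠ 0 then fin.1 ++ [fin.2.2] else fin.1) := by
  induction ts with
  | nil =>
    intro base M cnt hcnt hlt
    have h1 : (1 : Nat) ≤ cnt.toNat := by omega
    simp only [List.foldl_nil]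
    rw [cv_append_run base M cnt.toNat h1 hlt]
    have : ((cnt.toNat : Int)) = cnt := Int.toNat_of_nonneg (by omega)
    rw [this]
    simp [show cnt ≠ 0 by omega]
  | cons pr rest ih =>
    intro base M cnt hcnt hlt
    have hne : base ++ List.replicate cnt.toNat M ≠ [] := by
      have : cnt.toNat ≠ 0 := by omega
      simp [this]
    have hlast : (base ++ List.replicate cnt.toNat M).getLast? = some M := by
      have h2 : base ++ List.replicate cnt.toNat M
          = (base ++ List.replicate (cnt.toNat - 1) M) ++ [M] := by
        rw [show cnt.toNat = (cnt.toNat - 1) + 1 by omega, List.replicate_succ']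
        simp
      rw [h2]
      simp
    set t := pyCeilTime pr.1 pr.2 with ht
    have hstep : solutionStep (base ++ List.replicate cnt.toNat M) pr =
        if M > t then (base ++ List.replicate cnt.toNat M) ++ [M]
        else (base ++ List.replicate cnt.toNat M) ++ [t] := by
      unfold solutionStep
      rw [PySem.List.pyGet?_neg_one, hlast]
      simp [← ht]
      intro _ h _
      omega
    simp only [List.foldl_cons, hstep]
    by_cases hMt : M < t
    · -- new, strictly larger group
      have hb : solutionAltStep (cv base, some M, cnt) pr =
          (cv base ++ [cnt], some t, 1) := by
        unfold solutionAltStep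
        simp [← ht, hMt, show cnt ≠ 0 by omega]
      rw [if_neg (by omega), hb]
      have hrw : (base ++ List.replicate cnt.toNat M) ++ [t]
          = (base ++ List.replicate cnt.toNat M) ++ List.replicate (1 : Int).toNat t := by
        simp
      rw [hrw]
      have hlt' : ∀ x ∈ base ++ List.replicate cnt.toNat M, x < t := by
        intro x hx
        rcases List.mem_append.mp hx with hx | hx
        · exact lt_trans (hlt x hx) hMt
        · rw [List.eq_of_mem_replicate hx]; exact hMt
      have hcv : cv (base ++ List.replicate cnt.toNat M) = cv base ++ [cnt] := by
        rw [cv_append_run base M cnt.toNat (by omega) hlt, Int.toNat_of_nonneg (by omega)]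
      rw [← hcv]
      exact ih (base ++ List.replicate cnt.toNat M) t 1 (by omega) hlt'
    · -- joins the current group: the pushed element is M either way
      have hb : solutionAltStep (cv base, some M, cnt) pr = (cv base, some M, cnt + 1) := by
        unfold solutionAltStep
        simp [← ht, hMt]
      have hpush : (if M > t then (base ++ List.replicate cnt.toNat M) ++ [M]
          else (base ++ List.replicate cnt.toNat M) ++ [t])
          = base ++ List.replicate (cnt + 1).toNat M := by
        have h1 : (cnt + 1).toNat = cnt.toNat + 1 := by omega
        have h2 : List.replicate (cnt.toNat + 1) M = List.replicate cnt.toNat M ++ [M] :=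
          List.replicate_succ' ..
        by_cases h : M > t
        · simp [h, h1, h2]
        · have : t = M := le_antisymm (not_lt.mp hMt) (not_lt.mp h)
          simp [this, h1, h2]
      rw [hpush, hb]
      exact ih base M (cnt + 1) (by omega) hlt

-- ===== VERDICT (by name: the statement is the Claim_ definition above) =====
theorem solution_spec : Claim_equal_solution := by
  intro arr1 arr2 _hdom _hpre
  unfold Spec_solution solution solution_alt
  rw [values_counter_eq_cv]
  cases hz : arr1.zip arr2 with
  | nil => rfl
  | cons pr rest =>
    have h0 : solutionStep [] pr = [] ++ List.replicate (1 : Int).toNat (pyCeilTime pr.1 pr.2) := by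
      unfold solutionStep; simp
    have hb0 : solutionAltStep ([], none, 0) pr = (cv [], some (pyCeilTime pr.1 pr.2), 1) := by
      unfold solutionAltStep; simp [cv]
    simp only [List.foldl_cons, h0, hb0]
    exact main_inv rest [] (pyCeilTime pr.1 pr.2) 1 (by omega) (by simp)
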